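-- pv_equiv track=rewrite | github.com/marufmorshed1/CSE422-Labs-BRACU | Labs/Lab 1/Maruf.py | find_position
-- ===== SOURCE A (Python) =====
-- def find_position(city):
--     human_location = []
--     alien_location = []
--     for i in range(len(city)):
--         for j in range(len(city[i])):
--             if city[i][j] == 'A':
--                 alien_location.append((i, j))
--             elif city[i][j] == 'H':
--                 human_location.append((i, j))
--     return alien_location, human_location
--
-- city = []
-- ===== SOURCE B (Python) =====
-- def find_position(city):
--     # Pass 1: collect alien positions only.
--     alien_location = [(i, j)
--                       for i, row in enumerate(city)
--                       for j, v in enumerate(row)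
--                       if v == 'A']
--     # Pass 2: scan the whole grid again for humans.
--     human_location = [(i, j)
--                       for i, row in enumerate(city)
--                       for j, v in enumerate(row)
--                       if v == 'H']
--     return alien_location, human_location
-- ===== Notes on version B (the rewrite author's own statement) =====
-- stated objective: simpler
-- what changed: Replaces the single accumulator-based pass that appends to two lists with two independent row-major scans (comprehensions), one collecting 'A' positions and one collecting 'H' positions.
import Mathlib
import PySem

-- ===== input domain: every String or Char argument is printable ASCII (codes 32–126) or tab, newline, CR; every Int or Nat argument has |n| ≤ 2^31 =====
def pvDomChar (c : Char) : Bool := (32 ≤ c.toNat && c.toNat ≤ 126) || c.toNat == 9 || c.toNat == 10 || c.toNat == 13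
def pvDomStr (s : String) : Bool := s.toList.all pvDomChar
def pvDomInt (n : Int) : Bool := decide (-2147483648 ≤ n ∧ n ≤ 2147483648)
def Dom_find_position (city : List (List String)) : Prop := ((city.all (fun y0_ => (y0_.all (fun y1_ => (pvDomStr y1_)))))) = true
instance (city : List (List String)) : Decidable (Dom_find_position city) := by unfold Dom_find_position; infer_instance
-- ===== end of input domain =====

-- B replaces A's single combined pass carrying two accumulator lists by two independent
-- row-major scans, one collecting 'A' positions and one collecting 'H' positions (objective: simpler).

-- ===== PORT A =====
-- one pass over the grid by indices, appending to the pair of accumulators (human, alien)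
def find_position (city : List (List String)) : (List (Int × Int)) × (List (Int × Int)) :=
  let st :=
    (PySem.List.pyRange 0 city.length 1).foldl
      (fun (st : List (Int × Int) × List (Int × Int)) i =>
        (PySem.List.pyRange 0 (PySem.List.pyGetD city i []).length 1).foldl
          (fun st j =>
            let v := PySem.List.pyGetD (PySem.List.pyGetD city i []) j ""
            if v == "A" then (st.1, st.2 ++ [(i, j)])
            else if v == "H" then (st.1 ++ [(i, j)], st.2)
            else st)
          st)
      ([], [])
  (st.2, st.1)

-- ===== PORT B =====
-- one scan of the whole grid for a single target character (B's comprehension)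
def pvScan (c : String) (city : List (List String)) : List (Int × Int) :=
  (PySem.List.enumerate city).flatMap
    (fun p => ((PySem.List.enumerate p.2).filter (fun q => q.2 == c)).map (fun q => (p.1, q.1)))

def find_position_alt (city : List (List String)) : (List (Int × Int)) × (List (Int × Int)) :=
  (pvScan "A" city, pvScan "H" city)

-- ===== PRECONDITION & SPEC =====
def Spec_find_position (city : List (List String)) (out : (List (Int × Int)) × (List (Int × Int))) : Prop := out = find_position_alt city
instance (city : List (List String)) (out : (List (Int × Int)) × (List (Int × Int))) : Decidable (Spec_find_position city out) := by unfold Spec_find_position; infer_instance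

-- ===== CLAIM (what is proved, stated in full; the proofs are below) =====
def Claim_equal_find_position : Prop := ∀ (city : List (List String)), Dom_find_position city → Spec_find_position city (find_position city)

-- ===== LEMMAS AND PROOFS =====

-- members of `enumerate xs s` are (index, element) pairs: indexing recovers the element
theorem pvGetD_of_mem_enumerate {α : Type} (d : α) :
    ∀ (xs : List α) (s : Int) (p : Int × α), p ∈ PySem.List.enumerate xs s →
      PySem.List.pyGetD xs (p.1 - s) d = p.2 := by
  intro xs
  induction xs with
  | nil => intro s p hp; simp [PySem.List.enumerate] at hp
  | cons x xs ih =>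
    intro s p hp
    rw [PySem.List.enumerate_cons] at hp
    rcases List.mem_cons.mp hp with h | h
    · subst h; simp [PySem.List.pyGetD_of_nonneg]
    · have hge : s + 1 ≤ p.1 := by
        have : p.1 ∈ (PySem.List.enumerate xs (s + 1)).map (fun q => q.1) :=
          List.mem_map.mpr ⟨p, h, rfl⟩
        rw [PySem.List.map_fst_enumerate] at this
        exact (PySem.List.mem_pyRange_one.mp this).1
      have hih := ih (s + 1) p h
      rw [PySem.List.pyGetD_of_nonneg _ _ (by omega)] at hih
      rw [PySem.List.pyGetD_of_nonneg _ _ (by omega)]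
      have ht : (p.1 - s).toNat = (p.1 - (s + 1)).toNat + 1 := by omega
      rw [ht, List.getD_cons_succ]
      exact hih

-- A's inner index loop over a row equals the same loop over `enumerate row`
theorem pvInnerConv (i : Int) (row : List String)
    (st : List (Int × Int) × List (Int × Int)) :
    (PySem.List.pyRange 0 row.length 1).foldl
      (fun st j =>
        let v := PySem.List.pyGetD row j ""
        if v == "A" then (st.1, st.2 ++ [(i, j)])
        else if v == "H" then (st.1 ++ [(i, j)], st.2)
        else st) st
    = (PySem.List.enumerate row 0).foldl
      (fun st q =>
        if q.2 == "A" then (st.1, st.2 ++ [(i, q.1)])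
        else if q.2 == "H" then (st.1 ++ [(i, q.1)], st.2)
        else st) st := by
  have h0 : PySem.List.pyRange 0 (row.length : Int) 1
      = (PySem.List.enumerate row 0).map (fun q => q.1) := by
    rw [PySem.List.map_fst_enumerate]; norm_num
  rw [h0, List.foldl_map]
  apply PySem.List.foldl_congr_mem
  intro acc q hq
  have := pvGetD_of_mem_enumerate "" row 0 q hq
  simp only [sub_zero] at this
  simp [this]

-- A's inner loop (enumerate form) appends the row's 'H' and 'A' hits to the accumulators
theorem pvRowLoop (i : Int) :
    ∀ (row : List String) (s : Int) (st : List (Int × Int) × List (Int × Int)),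
    (PySem.List.enumerate row s).foldl
      (fun st q =>
        if q.2 == "A" then (st.1, st.2 ++ [(i, q.1)])
        else if q.2 == "H" then (st.1 ++ [(i, q.1)], st.2)
        else st) st
    = (st.1 ++ ((PySem.List.enumerate row s).filter (fun q => q.2 == "H")).map (fun q => (i, q.1)),
       st.2 ++ ((PySem.List.enumerate row s).filter (fun q => q.2 == "A")).map (fun q => (i, q.1))) := by
  intro row
  induction row with
  | nil => intro s st; simp [PySem.List.enumerate]
  | cons x xs ih =>
    intro s st
    rw [PySem.List.enumerate_cons, List.foldl_cons, ih (s + 1)]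
    by_cases hA : x = "A"
    · subst hA; simp
    · by_cases hH : x = "H"
      · subst hH; simp
      · simp [hA, hH]

-- A's outer loop (enumerate form) produces B's two flat scans
theorem pvCityLoop :
    ∀ (city : List (List String)) (s : Int) (st : List (Int × Int) × List (Int × Int)),
    (PySem.List.enumerate city s).foldl
      (fun st p =>
        (PySem.List.enumerate p.2 0).foldl
          (fun st q =>
            if q.2 == "A" then (st.1, st.2 ++ [(p.1, q.1)])
            else if q.2 == "H" then (st.1 ++ [(p.1, q.1)], st.2)
            else st) st) st
    = (st.1 ++ (PySem.List.enumerate city s).flatMap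
          (fun p => ((PySem.List.enumerate p.2).filter (fun q => q.2 == "H")).map (fun q => (p.1, q.1))),
       st.2 ++ (PySem.List.enumerate city s).flatMap
          (fun p => ((PySem.List.enumerate p.2).filter (fun q => q.2 == "A")).map (fun q => (p.1, q.1)))) := by
  intro city
  induction city with
  | nil => intro s st; simp [PySem.List.enumerate]
  | cons row rows ih =>
    intro s st
    rw [PySem.List.enumerate_cons]
    simp only [List.foldl_cons, List.flatMap_cons]
    rw [pvRowLoop s row 0 st, ih (s + 1)]
    simp [List.append_assoc]

-- ===== VERDICT (by name: the statement is the Claim_ definition above) =====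
theorem find_position_spec : Claim_equal_find_position := by
  intro city _
  show find_position city = find_position_alt city
  unfold find_position find_position_alt pvScan
  have h0 : PySem.List.pyRange 0 (city.length : Int) 1
      = (PySem.List.enumerate city 0).map (fun p => p.1) := by
    rw [PySem.List.map_fst_enumerate]; norm_num
  rw [h0, List.foldl_map]
  have hcong :
      (PySem.List.enumerate city 0).foldl
        (fun (st : List (Int × Int) × List (Int × Int)) p =>
          (PySem.List.pyRange 0 (PySem.List.pyGetD city p.1 []).length 1).foldl
            (fun st j =>
              let v := PySem.List.pyGetD (PySem.List.pyGetD city p.1 []) j ""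
              if v == "A" then (st.1, st.2 ++ [(p.1, j)])
              else if v == "H" then (st.1 ++ [(p.1, j)], st.2)
              else st) st) ([], [])
      = (PySem.List.enumerate city 0).foldl
        (fun st p =>
          (PySem.List.enumerate p.2 0).foldl
            (fun st q =>
              if q.2 == "A" then (st.1, st.2 ++ [(p.1, q.1)])
              else if q.2 == "H" then (st.1 ++ [(p.1, q.1)], st.2)
              else st) st) ([], []) := by
    apply PySem.List.foldl_congr_mem
    intro acc p hp
    have hrow := pvGetD_of_mem_enumerate [] city 0 p hp
    simp only [sub_zero] at hrow
    rw [hrow, pvInnerConv p.1 p.2 acc]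
  rw [hcong, pvCityLoop city 0 ([], [])]
  simp
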